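-- pv_equiv track=rewrite | github.com/pypi-data/pypi-mirror-402 | packages/nsflow/nsflow-0.6.7.tar.gz/nsflow-0.6.7/nsflow/backend/utils/logutils/process_log_bridge.py | _count_braces_outside_quotes
-- ===== SOURCE A (Python) =====
-- def _count_braces_outside_quotes(s: str) -> int:
--     depth = 0
--     in_str = False
--     esc = False
--     for ch in s:
--         if esc:
--             esc = False
--             continue
--         if ch == "\\":
--             esc = True
--             continue
--         if ch == '"':
--             in_str = not in_str
--             continue
--         if in_str:
--             continue
--         if ch == "{":
--             depth += 1
--         elif ch == "}":
--             depth -= 1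
--     return depth
-- ===== SOURCE B (Python) =====
-- import re
--
--
-- def _count_braces_outside_quotes(s: str) -> int:
--     # Remove every escape sequence (backslash + following char) globally,
--     # then split on '"': even-indexed segments are outside quoted strings.
--     stripped = re.sub(r'\\.', '', s, flags=re.DOTALL)
--     parts = stripped.split('"')
--     return sum(seg.count('{') - seg.count('}')
--                for i, seg in enumerate(parts) if i % 2 == 0)
-- ===== Notes on version B (the rewrite author's own statement) =====
-- stated objective: simpler
-- what changed: Replaced the stateful per-character loop (depth/in_str/esc flags) by a pipeline: regex-strip all escape sequences, split on the double-quote character, and sum brace counts over the even-indexed (outside-quotes) segments.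
import Mathlib
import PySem

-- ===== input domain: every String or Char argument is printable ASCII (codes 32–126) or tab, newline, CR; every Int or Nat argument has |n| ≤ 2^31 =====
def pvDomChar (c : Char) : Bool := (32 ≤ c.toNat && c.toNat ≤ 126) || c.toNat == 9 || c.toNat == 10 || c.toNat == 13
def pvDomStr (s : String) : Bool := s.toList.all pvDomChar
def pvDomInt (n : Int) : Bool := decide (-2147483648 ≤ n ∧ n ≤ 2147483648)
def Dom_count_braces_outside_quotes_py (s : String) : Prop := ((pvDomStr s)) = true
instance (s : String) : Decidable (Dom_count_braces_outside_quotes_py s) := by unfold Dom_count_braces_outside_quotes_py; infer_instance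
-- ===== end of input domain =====

-- B replaces A's stateful char loop by a strip-escapes / split-on-quote / count-even-segments pipeline (objective: simpler).

-- ===== PORT A =====
-- A's loop, state (depth, in_str, esc), one step per character, branches in A's order.
def pvAGo : List Char → Int → Bool → Bool → Int
  | [], depth, _, _ => depth
  | ch :: rest, depth, inStr, esc =>
    if esc then pvAGo rest depth inStr false
    else if ch = '\\' then pvAGo rest depth inStr true
    else if ch = '"' then pvAGo rest depth (!inStr) esc
    else if inStr then pvAGo rest depth inStr esc
    else if ch = '{' then pvAGo rest (depth + 1) inStr esc
    else if ch = '}' then pvAGo rest (depth - 1) inStr esc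
    else pvAGo rest depth inStr esc

def count_braces_outside_quotes_py (s : String) : Int :=
  pvAGo s.toList 0 false false

-- ===== PORT B =====
-- re.sub(r'\\.', '', s, flags=re.DOTALL): drop each backslash together with the char after it
-- (a trailing lone backslash has no following char and stays).
def pvStripEsc : List Char → List Char
  | [] => []
  | c :: rest =>
    if c = '\\' then
      match rest with
      | [] => [c]
      | _ :: rest' => pvStripEsc rest'
    else c :: pvStripEsc rest

-- str.split('"')
def pvSplitQ : List Char → List (List Char)
  | [] => [[]]
  | c :: rest =>
    if c = '"' then [] :: pvSplitQ rest
    else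
      match pvSplitQ rest with
      | [] => [[c]]
      | seg :: segs => (c :: seg) :: segs

-- seg.count('{') - seg.count('}')
def pvBraceCount (seg : List Char) : Int :=
  (seg.count '{' : Int) - (seg.count '}' : Int)

-- sum the brace counts of the segments at even indices (skip = true means the segment is inside quotes)
def pvAltSum : Bool → List (List Char) → Int
  | _, [] => 0
  | skip, seg :: segs => (if skip then 0 else pvBraceCount seg) + pvAltSum (!skip) segs

def count_braces_outside_quotes_py_alt (s : String) : Int :=
  pvAltSum false (pvSplitQ (pvStripEsc s.toList))

-- ===== PRECONDITION & SPEC =====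
def Spec_count_braces_outside_quotes_py (s : String) (out : Int) : Prop := out = count_braces_outside_quotes_py_alt s
instance (s : String) (out : Int) : Decidable (Spec_count_braces_outside_quotes_py s out) := by unfold Spec_count_braces_outside_quotes_py; infer_instance

-- ===== CLAIM (what is proved, stated in full; the proofs are below) =====
def Claim_equal_count_braces_outside_quotes_py : Prop := ∀ (s : String), Dom_count_braces_outside_quotes_py s → Spec_count_braces_outside_quotes_py s (count_braces_outside_quotes_py s)

-- ===== LEMMAS AND PROOFS =====

-- A's loop after escapes are gone (no esc flag needed)
def pvFGo : List Char → Int → Bool → Int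
  | [], depth, _ => depth
  | ch :: rest, depth, inStr =>
    if ch = '"' then pvFGo rest depth (!inStr)
    else if inStr then pvFGo rest depth inStr
    else if ch = '{' then pvFGo rest (depth + 1) inStr
    else if ch = '}' then pvFGo rest (depth - 1) inStr
    else pvFGo rest depth inStr

lemma pvAGo_strip (l : List Char) : ∀ (d : Int) (b : Bool),
    pvAGo l d b false = pvFGo (pvStripEsc l) d b := by
  induction l using pvStripEsc.induct with
  | case1 => intro d b; simp [pvAGo, pvStripEsc, pvFGo]
  | case2 =>
    intro d b
    simp [pvAGo, pvStripEsc, pvFGo]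
  | case3 c rest ih =>
    intro d b
    have h1 : pvAGo ('\\' :: c :: rest) d b false = pvAGo rest d b false := by
      simp [pvAGo]
    have h2 : pvStripEsc ('\\' :: c :: rest) = pvStripEsc rest := by
      rw [pvStripEsc.eq_def]; simp
    rw [h1, h2, ih]
  | case4 c rest hc ih =>
    intro d b
    have h2 : pvStripEsc (c :: rest) = c :: pvStripEsc rest := by
      rw [pvStripEsc.eq_def]; simp [hc]
    rw [h2]
    show pvAGo (c :: rest) d b false = pvFGo (c :: pvStripEsc rest) d b
    simp only [pvAGo, pvFGo, if_neg hc, Bool.false_eq_true, if_false]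
    by_cases hq : c = '"'
    · simp [hq, ih]
    · simp only [if_neg hq]
      by_cases hb : b
      · simp [hb, ih]
      · simp only [hb, Bool.false_eq_true, if_false]
        by_cases h1 : c = '{'
        · simp [h1, ih]
        · by_cases h2' : c = '}' <;> simp [h1, h2', ih]

lemma pvSplitQ_ne_nil (l : List Char) : pvSplitQ l ≠ [] := by
  cases l with
  | nil => simp [pvSplitQ]
  | cons c rest =>
    simp only [pvSplitQ]
    split
    · simp
    · cases pvSplitQ rest <;> simp

lemma pvBraceCount_nil : pvBraceCount [] = 0 := by simp [pvBraceCount]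

lemma pvBraceCount_cons (c : Char) (s : List Char) :
    pvBraceCount (c :: s) =
      (if c = '{' then 1 else if c = '}' then -1 else 0) + pvBraceCount s := by
  simp only [pvBraceCount, List.count_cons]
  by_cases h1 : c = '{'
  · simp [h1]; ring
  · by_cases h2 : c = '}'
    · simp [h2]; ring
    · simp [h1, h2]

lemma pvFGo_altSum (l : List Char) : ∀ (d : Int) (b : Bool),
    pvFGo l d b = d + pvAltSum b (pvSplitQ l) := by
  induction l with
  | nil => intro d b; simp [pvFGo, pvSplitQ, pvAltSum, pvBraceCount]
  | cons c rest ih =>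
    intro d b
    by_cases hq : c = '"'
    · subst hq
      have hs : pvSplitQ ('"' :: rest) = [] :: pvSplitQ rest := by simp [pvSplitQ]
      rw [hs]
      simp only [pvFGo, pvAltSum, pvBraceCount_nil]
      rw [ih]
      simp
    · obtain ⟨s0, ss, hs⟩ : ∃ s0 ss, pvSplitQ rest = s0 :: ss := by
        cases h : pvSplitQ rest with
        | nil => exact absurd h (pvSplitQ_ne_nil rest)
        | cons a bb => exact ⟨a, bb, rfl⟩
      have hsplit : pvSplitQ (c :: rest) = (c :: s0) :: ss := by
        simp only [pvSplitQ, if_neg hq, hs]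
      rw [hsplit]
      simp only [pvFGo, if_neg hq, pvAltSum, pvBraceCount_cons]
      by_cases hb : b
      · simp only [hb, if_true]
        rw [ih]
        simp [hs, pvAltSum]
      · simp only [hb, Bool.false_eq_true, if_false, Bool.not_false]
        by_cases h1 : c = '{'
        · rw [if_pos h1, if_pos h1, ih, hs]
          simp only [pvAltSum, Bool.not_false, if_false, Bool.false_eq_true]
          ring
        · rw [if_neg h1, if_neg h1]
          by_cases h2 : c = '}'
          · rw [if_pos h2, if_pos h2, ih, hs]
            simp only [pvAltSum, Bool.not_false, if_false, Bool.false_eq_true]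
            ring
          · rw [if_neg h2, if_neg h2, ih, hs]
            simp only [pvAltSum, Bool.not_false, if_false, Bool.false_eq_true]
            ring

-- ===== VERDICT (by name: the statement is the Claim_ definition above) =====
theorem count_braces_outside_quotes_py_spec : Claim_equal_count_braces_outside_quotes_py := by
  intro s _
  unfold Spec_count_braces_outside_quotes_py count_braces_outside_quotes_py count_braces_outside_quotes_py_alt
  rw [pvAGo_strip, pvFGo_altSum]
  simp
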